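-- pv_equiv track=rewrite | github.com/jizhouli/ladder-tournament | requirements/zaih-core/zaih_core/caching.py | format_memcached_servers
-- ===== SOURCE A (Python) =====
-- def format_memcached_servers(memcached_urls):
--     servers = []
--     urls = memcached_urls.split(',')
--     for url in urls:
--         server = url.split(':')
--         if not server or len(server) != 2:
--             break
--         host, port = server
--         servers.append((host, int(port)))
--     return servers
-- ===== SOURCE B (Python) =====
-- def format_memcached_servers(memcached_urls):
--     def parse(s):
--         seg, sep, rest = s.partition(',')
--         host, colon, port = seg.partition(':')
--         if not colon or ':' in port:
--             return []
--         entry = (host, int(port))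
--         return [entry] + parse(rest) if sep else [entry]
--     return parse(memcached_urls)
-- ===== Notes on version B (the rewrite author's own statement) =====
-- stated objective: alternative
-- what changed: Replaces A's iterative split-everything-then-loop-and-break with a recursive-descent parser: each step peels one comma-delimited segment off the string with str.partition, validates it with a second partition on the colon, and recurses on the remainder only while a comma separator was consumed.
import Mathlib
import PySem

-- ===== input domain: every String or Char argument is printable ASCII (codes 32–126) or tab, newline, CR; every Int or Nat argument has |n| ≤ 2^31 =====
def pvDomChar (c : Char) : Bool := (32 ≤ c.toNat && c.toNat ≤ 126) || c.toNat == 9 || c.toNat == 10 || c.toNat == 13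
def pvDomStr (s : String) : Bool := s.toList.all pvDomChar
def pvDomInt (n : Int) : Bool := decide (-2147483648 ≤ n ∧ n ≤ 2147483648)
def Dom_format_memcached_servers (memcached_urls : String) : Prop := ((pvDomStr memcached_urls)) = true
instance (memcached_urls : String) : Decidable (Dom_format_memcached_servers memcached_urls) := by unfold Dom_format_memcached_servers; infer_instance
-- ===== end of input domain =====

-- B replaces A's split-everything-then-iterate-and-break loop with a recursive-descent
-- parser built on str.partition (peel one segment, validate, recurse); objective: alternative.


-- ===== PORT A =====
-- url.split(sep) for a nonempty literal sep; split? is some here, exact per PySem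
def pvSplit (s sep : String) : List String := (PySem.Str.split? s sep).getD [s]

-- int(port) raises ValueError when port is not int-like; those inputs are outside
-- Pre_ below, so the port uses (… .getD 0) there (never reached inside Pre_).
def pvA_loop : List String → List (String × Int) → List (String × Int)
  | [], servers => servers
  | url :: rest, servers =>
    let server := pvSplit url ":"
    if server = [] ∨ server.length ≠ 2 then servers
    else
      match server with
      | [host, port] => pvA_loop rest (servers ++ [(host, (PySem.Int.ofStr? port).getD 0)])
      | _ => servers

def format_memcached_servers (memcached_urls : String) : List (String × Int) :=
  pvA_loop (pvSplit memcached_urls ",") []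

-- ===== PORT B =====
-- s.partition(sep) for a ONE-CHARACTER sep, hand-ported step for step over List Char
-- (exact for the single-character separators ',' and ':' that Source B uses):
-- scan left to right; at the first occurrence of c return (before, True, after).
def pvPartition (l : List Char) (c : Char) : List Char × Bool × List Char :=
  match l with
  | [] => ([], false, [])
  | x :: xs =>
    if x = c then ([], true, xs)
    else
      let r := pvPartition xs c
      (x :: r.1, r.2.1, r.2.2)

-- termination lemma for the recursive parser: a found partition strictly shrinks the rest
lemma pvPartition_rest_lt (l : List Char) (c : Char) :
    (pvPartition l c).2.1 = true → (pvPartition l c).2.2.length < l.length := by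
  induction l with
  | nil => simp [pvPartition]
  | cons x xs ih =>
    by_cases h : x = c
    · simp [pvPartition, h]
    · intro hf
      simp only [pvPartition, if_neg h] at hf ⊢
      have := ih hf
      simpa using Nat.lt_succ_of_lt this

-- Source B's inner 'parse': peel one comma segment, validate it via partition(':'),
-- emit (host, int(port)) and recurse on the remainder only if a comma was consumed.
-- ':' in port — membership of a single character, exact.
def pvParseB (s : List Char) : List (String × Int) :=
  match hp : pvPartition s ',' with
  | (seg, sep, rest) =>
    match pvPartition seg ':' with
    | (host, colon, port) =>
      if colon = false ∨ port.contains ':' then []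
      else
        let entry := (String.ofList host, (PySem.Int.ofStr? (String.ofList port)).getD 0)
        if hs : sep = true then entry :: pvParseB rest else [entry]
termination_by s.length
decreasing_by
  have h := pvPartition_rest_lt s ',' (by rw [hp]; exact hs)
  rw [hp] at h; exact h

def format_memcached_servers_alt (memcached_urls : String) : List (String × Int) :=
  pvParseB memcached_urls.toList

-- ===== PRECONDITION & SPEC =====
-- Pre_ excludes exactly the inputs on which Python A raises ValueError: some two-part
-- segment ahead of the break point carries a port field that int() cannot parse.
def Pre_format_memcached_servers (memcached_urls : String) : Prop :=
  ∀ p ∈ ((pvSplit memcached_urls ",").map (fun u => pvSplit u ":")).takeWhile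
        (fun p => p.length = 2),
    (PySem.Int.ofStr? (p.getD 1 "")).isSome = true
instance (memcached_urls : String) : Decidable (Pre_format_memcached_servers memcached_urls) := by unfold Pre_format_memcached_servers; infer_instance

def pvWitness_format_memcached_servers : String := "a:1,b:2,x"

def Spec_format_memcached_servers (memcached_urls : String) (out : List (String × Int)) : Prop := out = format_memcached_servers_alt memcached_urls
instance (memcached_urls : String) (out : List (String × Int)) : Decidable (Spec_format_memcached_servers memcached_urls out) := by unfold Spec_format_memcached_servers; infer_instance

-- ===== CLAIM (what is proved, stated in full; the proofs are below) =====
def Claim_equal_format_memcached_servers : Prop := ∀ (memcached_urls : String), Dom_format_memcached_servers memcached_urls → Pre_format_memcached_servers memcached_urls → Spec_format_memcached_servers memcached_urls (format_memcached_servers memcached_urls)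

-- ===== LEMMAS AND PROOFS =====

-- proof helper: the comma/colon split of A, re-expressed through pvPartition
def pvSplit1 (c : Char) (s : List Char) : List (List Char) :=
  match hp : pvPartition s c with
  | (a, true, b) => a :: pvSplit1 c b
  | (_, false, _) => [s]
termination_by s.length
decreasing_by
  have h := pvPartition_rest_lt s c (by rw [hp])
  rw [hp] at h; exact h

lemma pvSplit1_spec (c : Char) (s : List Char) {a b : List Char} {f : Bool}
    (hp : pvPartition s c = (a, f, b)) :
    pvSplit1 c s = if f then a :: pvSplit1 c b else [s] := by
  rw [pvSplit1]
  split <;> rename_i heq <;> rw [hp] at heq <;> simp only [Prod.mk.injEq] at heq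
  · obtain ⟨rfl, hf, rfl⟩ := heq
    simp [hf]
  · simp [heq.2.1]

lemma pvParseB_spec (s : List Char) {seg rest host port : List Char} {sep colon : Bool}
    (hp : pvPartition s ',' = (seg, sep, rest)) (hq : pvPartition seg ':' = (host, colon, port)) :
    pvParseB s =
      if colon = false ∨ port.contains ':' then []
      else if sep then
        (String.ofList host, (PySem.Int.ofStr? (String.ofList port)).getD 0) :: pvParseB rest
      else [(String.ofList host, (PySem.Int.ofStr? (String.ofList port)).getD 0)] := by
  rw [pvParseB]
  split
  rename_i heq
  rw [hp] at heq
  simp only [Prod.mk.injEq] at heq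
  obtain ⟨rfl, rfl, rfl⟩ := heq
  split
  rename_i heq2
  rw [hq] at heq2
  simp only [Prod.mk.injEq] at heq2
  obtain ⟨rfl, rfl, rfl⟩ := heq2
  by_cases hcol : colon = false ∨ port.contains ':'
  · simp [hcol]
  · rw [if_neg hcol, if_neg hcol]
    cases sep <;> simp

lemma pvPartition_not_found (l : List Char) (c : Char)
    (h : (pvPartition l c).2.1 = false) : pvPartition l c = (l, false, []) := by
  induction l with
  | nil => rfl
  | cons x xs ih =>
    by_cases hx : x = c
    · simp [pvPartition, hx] at h
    · simp only [pvPartition, if_neg hx] at h ⊢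
      rw [ih h]

lemma pvPartition_found_iff (l : List Char) (c : Char) :
    (pvPartition l c).2.1 = true ↔ c ∈ l := by
  induction l with
  | nil => simp [pvPartition]
  | cons x xs ih =>
    by_cases hx : x = c
    · simp [pvPartition, hx]
    · simp [pvPartition, ih, Ne.symm hx, hx]

def pvConsHead (x : List Char) : List (List Char) → List (List Char)
  | [] => [x]
  | h :: t => (x ++ h) :: t

lemma pvSplit1_ne_nil (c : Char) (s : List Char) : pvSplit1 c s ≠ [] := by
  rcases hp : pvPartition s c with ⟨a, f, b⟩
  rw [pvSplit1_spec c s hp]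
  cases f <;> simp

lemma pvGo_eq (c : Char) (fuel : Nat) (l cur : List Char) (acc : List (List Char))
    (h : l.length < fuel) :
    PySem.Chars.splitOn.go [c] fuel l cur acc =
      acc.reverse ++ pvConsHead cur.reverse (pvSplit1 c l) := by
  induction fuel generalizing l cur acc with
  | zero => omega
  | succ fuel ih =>
    cases l with
    | nil =>
      rw [PySem.Chars.splitOn.go, pvSplit1_spec c [] rfl]
      simp [pvConsHead]
      omega
    | cons x xs =>
      rw [PySem.Chars.splitOn.go]
      by_cases hx : x = c
      · have hpref : List.isPrefixOf [c] (x :: xs) = true := by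
          simp [List.isPrefixOf, hx]
        rw [if_pos hpref]
        have hrec := ih xs [] (cur.reverse :: acc) (by simpa using Nat.lt_of_succ_lt_succ h)
        have hpx1 : pvPartition (x :: xs) c = ([], true, xs) := by simp [pvPartition, hx]
        have hsp : pvSplit1 c (x :: xs) = [] :: pvSplit1 c xs := by
          rw [pvSplit1_spec c (x :: xs) hpx1]
          simp
        simp only [List.length_cons, List.length_nil, List.drop_succ_cons, List.drop_zero]
        rw [hrec, hsp]
        rcases hs : pvSplit1 c xs with _ | ⟨hd, tl⟩
        · exact absurd hs (pvSplit1_ne_nil c xs)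
        · simp [pvConsHead]
      · have hpref : ¬ (List.isPrefixOf [c] (x :: xs) = true) := by
          simp [List.isPrefixOf]
          exact fun hcx => hx hcx.symm
        rw [if_neg hpref]
        have hrec := ih xs (x :: cur) acc (by simpa using Nat.lt_of_succ_lt_succ h)
        rw [hrec]
        rcases hp : pvPartition xs c with ⟨a, f, b⟩
        have hpx : pvPartition (x :: xs) c = (x :: a, f, b) := by
          simp [pvPartition, if_neg hx, hp]
        rw [pvSplit1_spec c xs hp, pvSplit1_spec c (x :: xs) hpx]
        cases f
        · simp [pvConsHead]
        · rcases hs : pvSplit1 c b with _ | ⟨hd, tl⟩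
          · exact absurd hs (pvSplit1_ne_nil c b)
          · simp [pvConsHead]

lemma pvSplitOn_single (c : Char) (l : List Char) :
    PySem.Chars.splitOn l [c] = pvSplit1 c l := by
  rw [PySem.Chars.splitOn, pvGo_eq c (l.length + 1) l [] [] (by omega)]
  rcases hs : pvSplit1 c l with _ | ⟨hd, tl⟩
  · exact absurd hs (pvSplit1_ne_nil c l)
  · simp [pvConsHead]

lemma pvSplit_single (l : List Char) (sep : String) (c : Char) (h : sep.toList = [c]) :
    pvSplit (String.ofList l) sep = (pvSplit1 c l).map String.ofList := by
  have hne : sep.toList.isEmpty = false := by rw [h]; rfl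
  simp [pvSplit, PySem.Str.split?, PySem.Chars.split?, hne, h, pvSplitOn_single]

-- the heart of the equivalence: A's accumulate-and-break loop over the comma split
-- computes exactly B's recursive descent
lemma pvA_loop_eq_parse (l : List Char) (acc : List (String × Int)) :
    pvA_loop ((pvSplit1 ',' l).map String.ofList) acc = acc ++ pvParseB l := by
  induction hn : l.length using Nat.strong_induction_on generalizing l acc with
  | _ n ih =>
  subst hn
  rcases hp : pvPartition l ',' with ⟨seg, sep, rest⟩
  rcases hq : pvPartition seg ':' with ⟨host, colon, port⟩
  rw [pvParseB_spec l hp hq, pvSplit1_spec ',' l hp]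
  have hsegsplit := pvSplit_single seg ":" ':' rfl
  rw [pvSplit1_spec ':' seg hq] at hsegsplit
  cases sep with
  | false =>
    -- no comma: the whole string is the single segment
    have h0 := pvPartition_not_found l ',' (by rw [hp])
    rw [hp] at h0
    simp only [Prod.mk.injEq] at h0
    obtain ⟨hsl, -, -⟩ := h0
    subst hsl
    cases colon with
    | false =>
      simp only [if_false, Bool.false_eq_true] at hsegsplit
      simp [pvA_loop, hsegsplit]
    | true =>
      simp only [if_true] at hsegsplit
      by_cases hc : port.contains ':'
      · have hf2 : (pvPartition port ':').2.1 = true := by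
          rw [pvPartition_found_iff]; simpa using hc
        rcases hq2 : pvPartition port ':' with ⟨a2, f2, b2⟩
        rw [hq2] at hf2; simp at hf2; subst hf2
        rw [pvSplit1_spec ':' port hq2] at hsegsplit
        simp only [if_true] at hsegsplit
        rcases hs3 : pvSplit1 ':' b2 with _ | ⟨hd3, tl3⟩
        · exact absurd hs3 (pvSplit1_ne_nil ':' b2)
        · rw [hs3] at hsegsplit
          have hmem : ':' ∈ port := by simpa using hc
          simp [pvA_loop, hsegsplit, hc, hmem]
      · have hf2 : (pvPartition port ':').2.1 = false := by
          rw [← Bool.not_eq_true, pvPartition_found_iff]; simpa using hc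
        rw [pvSplit1_spec ':' port (pvPartition_not_found port ':' hf2)] at hsegsplit
        simp only [if_false, Bool.false_eq_true] at hsegsplit
        have hmem : ':' ∉ port := by simpa using hc
        simp [pvA_loop, hsegsplit, hc, hmem]
  | true =>
    have hrest : rest.length < l.length := by
      have hlt := pvPartition_rest_lt l ',' (by rw [hp])
      rw [hp] at hlt; exact hlt
    cases colon with
    | false =>
      simp only [if_false, Bool.false_eq_true] at hsegsplit
      simp [pvA_loop, hsegsplit]
    | true =>
      simp only [if_true] at hsegsplit
      by_cases hc : port.contains ':'
      · have hf2 : (pvPartition port ':').2.1 = true := by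
          rw [pvPartition_found_iff]; simpa using hc
        rcases hq2 : pvPartition port ':' with ⟨a2, f2, b2⟩
        rw [hq2] at hf2; simp at hf2; subst hf2
        rw [pvSplit1_spec ':' port hq2] at hsegsplit
        simp only [if_true] at hsegsplit
        rcases hs3 : pvSplit1 ':' b2 with _ | ⟨hd3, tl3⟩
        · exact absurd hs3 (pvSplit1_ne_nil ':' b2)
        · rw [hs3] at hsegsplit
          have hmem : ':' ∈ port := by simpa using hc
          simp [pvA_loop, hsegsplit, hc, hmem]
      · have hf2 : (pvPartition port ':').2.1 = false := by
          rw [← Bool.not_eq_true, pvPartition_found_iff]; simpa using hc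
        rw [pvSplit1_spec ':' port (pvPartition_not_found port ':' hf2)] at hsegsplit
        simp only [if_false, Bool.false_eq_true] at hsegsplit
        have hstep : pvA_loop (String.ofList seg :: (pvSplit1 ',' rest).map String.ofList) acc
            = pvA_loop ((pvSplit1 ',' rest).map String.ofList)
                (acc ++ [(String.ofList host, (PySem.Int.ofStr? (String.ofList port)).getD 0)]) := by
          simp [pvA_loop, hsegsplit]
        simp only [eq_self_iff_true, if_true, Bool.true_eq_false, false_or, List.map_cons]
        rw [if_neg hc, hstep, ih rest.length hrest rest _ rfl]
        simp

-- ===== VERDICT (by name: the statement is the Claim_ definition above) =====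
theorem format_memcached_servers_spec : Claim_equal_format_memcached_servers := by
  intro s _ _
  unfold Spec_format_memcached_servers format_memcached_servers format_memcached_servers_alt
  have h : pvSplit s "," = (pvSplit1 ',' s.toList).map String.ofList := by
    have := pvSplit_single s.toList "," ',' rfl
    simpa using this
  rw [h, pvA_loop_eq_parse]
  simp
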